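-- pv_equiv track=rewrite | github.com/JocelinPitt/MusicOnto | Sentic_Corr.py | compute_all_sentics
-- ===== SOURCE A (Python) =====
-- def compute_all_sentics(sent):
--     sent1 = sent2 = sent3 = sent4 = 1
--     for elem in sent:
--         sent1 = sent1 * elem[0]
--         sent2 = sent2 * elem[1]
--         sent3 = sent3 * elem[2]
--         sent4 = sent4 * elem[3]
--
--     final = [sent1, sent2, sent3, sent4]
--     return final
-- ===== SOURCE B (Python) =====
-- def _prod(xs):
--     p = 1
--     for x in xs:
--         p *= x
--     return p
--
--
-- def compute_all_sentics(sent):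
--     return [_prod([e[0] for e in sent]),
--             _prod([e[1] for e in sent]),
--             _prod([e[2] for e in sent]),
--             _prod([e[3] for e in sent])]
-- ===== Notes on version B (the rewrite author's own statement) =====
-- stated objective: alternative
-- what changed: B transposes the data: it extracts each of the four columns and takes its product with a small helper, instead of threading four named accumulators through one explicit loop.
import Mathlib
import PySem

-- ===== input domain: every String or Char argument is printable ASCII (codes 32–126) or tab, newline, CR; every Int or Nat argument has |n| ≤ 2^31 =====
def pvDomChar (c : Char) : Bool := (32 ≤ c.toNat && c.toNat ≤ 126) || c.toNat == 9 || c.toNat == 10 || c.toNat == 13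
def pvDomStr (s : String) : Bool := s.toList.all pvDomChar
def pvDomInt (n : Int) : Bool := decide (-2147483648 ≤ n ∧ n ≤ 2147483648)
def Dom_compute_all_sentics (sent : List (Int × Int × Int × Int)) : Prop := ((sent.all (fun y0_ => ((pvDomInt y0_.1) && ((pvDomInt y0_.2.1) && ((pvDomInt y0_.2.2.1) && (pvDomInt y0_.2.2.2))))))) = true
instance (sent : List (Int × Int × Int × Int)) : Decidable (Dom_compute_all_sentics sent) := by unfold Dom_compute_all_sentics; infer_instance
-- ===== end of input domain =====

-- B replaces A's single loop over four named accumulators by a column-wise decomposition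
-- (extract each column, take its product); same O(n) cost, different structure.

-- ===== PORT A =====
def compute_all_sentics (sent : List (Int × Int × Int × Int)) : List Int :=
  let r := sent.foldl
    (fun (s : Int × Int × Int × Int) e =>
      (s.1 * e.1, s.2.1 * e.2.1, s.2.2.1 * e.2.2.1, s.2.2.2 * e.2.2.2))
    (1, 1, 1, 1)
  [r.1, r.2.1, r.2.2.1, r.2.2.2]

-- ===== PORT B =====
-- helper _prod: a running product over a list
def pvProd (xs : List Int) : Int := xs.foldl (· * ·) 1

def compute_all_sentics_alt (sent : List (Int × Int × Int × Int)) : List Int :=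
  [pvProd (sent.map (fun e => e.1)),
   pvProd (sent.map (fun e => e.2.1)),
   pvProd (sent.map (fun e => e.2.2.1)),
   pvProd (sent.map (fun e => e.2.2.2))]

-- ===== PRECONDITION & SPEC =====
def Spec_compute_all_sentics (sent : List (Int × Int × Int × Int)) (out : List Int) : Prop := out = compute_all_sentics_alt sent
instance (sent : List (Int × Int × Int × Int)) (out : List Int) : Decidable (Spec_compute_all_sentics sent out) := by unfold Spec_compute_all_sentics; infer_instance

-- ===== CLAIM (what is proved, stated in full; the proofs are below) =====
def Claim_equal_compute_all_sentics : Prop := ∀ (sent : List (Int × Int × Int × Int)), Dom_compute_all_sentics sent → Spec_compute_all_sentics sent (compute_all_sentics sent)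

-- ===== LEMMAS AND PROOFS =====

theorem foldl_mul_shift (xs : List Int) (a : Int) :
    xs.foldl (· * ·) a = a * xs.foldl (· * ·) 1 := by
  induction xs generalizing a with
  | nil => simp
  | cons x xs ih =>
    simp only [List.foldl_cons]
    rw [ih (a * x), ih (1 * x)]
    ring

theorem pvProd_cons (x : Int) (xs : List Int) : pvProd (x :: xs) = x * pvProd xs := by
  simp only [pvProd, List.foldl_cons]
  rw [foldl_mul_shift]; ring

theorem foldl4_eq (sent : List (Int × Int × Int × Int)) (a b c d : Int) :
    sent.foldl
      (fun (s : Int × Int × Int × Int) e =>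
        (s.1 * e.1, s.2.1 * e.2.1, s.2.2.1 * e.2.2.1, s.2.2.2 * e.2.2.2))
      (a, b, c, d)
    = (a * pvProd (sent.map (fun e => e.1)),
       b * pvProd (sent.map (fun e => e.2.1)),
       c * pvProd (sent.map (fun e => e.2.2.1)),
       d * pvProd (sent.map (fun e => e.2.2.2))) := by
  induction sent generalizing a b c d with
  | nil => simp [pvProd]
  | cons e rest ih =>
    simp only [List.foldl_cons, List.map_cons, ih, pvProd_cons]
    congr 1 <;> [ring; (congr 1 <;> [ring; (congr 1 <;> ring)])]

-- ===== VERDICT (by name: the statement is the Claim_ definition above) =====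
theorem compute_all_sentics_spec : Claim_equal_compute_all_sentics := by
  intro sent _
  show _ = _
  simp only [compute_all_sentics, compute_all_sentics_alt, foldl4_eq]
  simp
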